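-- pv_equiv track=rewrite | github.com/Sahil-4/dsapractice | Y2026/APRIL2026/D022/main.py | findMean
-- ===== SOURCE A (Python) =====
-- from typing import List
--
-- def findMean(arr: List[int], queries: List[List[int]]) -> List[int]:
--     # code here
--
--     N = len(arr)
--     M = len(queries)
--
--     prefix_sum = [0] * (N + 1)
--
--     for i in range(N):
--         prefix_sum[i + 1] = prefix_sum[i] + arr[i]
--
--     mean_array = [0] * M
--
--     for i in range(M):
--         [l, r] = queries[i]
--
--         mean_array[i] = (prefix_sum[r + 1] - prefix_sum[l]) // (r - l + 1)
--
--     return mean_array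
-- ===== SOURCE B (Python) =====
-- from typing import List
--
-- def findMean(arr: List[int], queries: List[List[int]]) -> List[int]:
--     # no prefix table: sum each queried range directly
--     means = []
--     for [l, r] in queries:
--         total = 0
--         for j in range(l, r + 1):
--             total += arr[j]
--         means.append(total // (r - l + 1))
--     return means
-- ===== Notes on version B (the rewrite author's own statement) =====
-- stated objective: simpler
-- what changed: Drops the prefix-sum table: each query's subarray sum is computed by a direct loop over range(l, r+1), so there is no precomputation pass and no O(1)-lookup table.
-- outside the precondition, e.g. on findMean([1, 2, 3], [[2, 0]]): A returns [2], B returns [0]; on findMean([1, 2, 3], [[-1, 2]]): A returns [0], B returns [2]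
import Mathlib
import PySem

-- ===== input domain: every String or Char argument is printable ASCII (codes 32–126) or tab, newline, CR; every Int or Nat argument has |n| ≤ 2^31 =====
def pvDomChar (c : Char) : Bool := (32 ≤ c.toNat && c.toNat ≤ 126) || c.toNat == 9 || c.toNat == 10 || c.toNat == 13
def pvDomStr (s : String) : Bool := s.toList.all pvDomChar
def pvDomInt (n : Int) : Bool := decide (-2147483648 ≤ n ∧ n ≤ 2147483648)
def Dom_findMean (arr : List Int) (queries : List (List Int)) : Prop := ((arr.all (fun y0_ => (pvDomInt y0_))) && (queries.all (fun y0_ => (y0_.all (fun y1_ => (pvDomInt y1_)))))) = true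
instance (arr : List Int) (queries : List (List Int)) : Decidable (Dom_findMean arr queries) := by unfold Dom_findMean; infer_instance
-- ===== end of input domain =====

-- B drops A's prefix-sum table and sums each queried range [l, r] directly; same results on valid queries.


-- ===== PORT A =====
def findMean (arr : List Int) (queries : List (List Int)) : List Int :=
  let N : Int := arr.length
  let M : Int := queries.length
  let prefixSum0 : List Int := List.replicate (N.toNat + 1) 0
  let prefixSum : List Int :=
    (PySem.List.pyRange 0 N 1).foldl
      (fun ps i => PySem.List.pySetD ps (i + 1) (PySem.List.pyGetD ps i 0 + PySem.List.pyGetD arr i 0))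
      prefixSum0
  let meanArray0 : List Int := List.replicate M.toNat 0
  (PySem.List.pyRange 0 M 1).foldl
    (fun ma i =>
      let q := PySem.List.pyGetD queries i []
      let l := PySem.List.pyGetD q 0 0
      let r := PySem.List.pyGetD q 1 0
      PySem.List.pySetD ma i
        (PySem.Int.floordiv (PySem.List.pyGetD prefixSum (r + 1) 0 - PySem.List.pyGetD prefixSum l 0) (r - l + 1)))
    meanArray0

-- ===== PORT B =====
def findMean_alt (arr : List Int) (queries : List (List Int)) : List Int :=
  queries.foldl
    (fun means q =>
      let l := PySem.List.pyGetD q 0 0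
      let r := PySem.List.pyGetD q 1 0
      let total := (PySem.List.pyRange l (r + 1) 1).foldl (fun t j => t + PySem.List.pyGetD arr j 0) 0
      means ++ [PySem.Int.floordiv total (r - l + 1)])
    []

-- ===== PRECONDITION & SPEC =====
-- Pre_ admits exactly two-element queries [l, r] with 0 ≤ l ≤ r < len(arr); it excludes inputs where A
-- raises (wrong query arity, r+1 out of the prefix table, divisor r-l+1 = 0) and the degenerate queries
-- (negative l, or l > r with l - r ≥ 2) on which A's negative-index wraparound into the prefix table and
-- B's reversed/negative-range value are both accidental and neither is specified.
def Pre_findMean (arr : List Int) (queries : List (List Int)) : Prop :=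
  ∀ q ∈ queries, q.length = 2 ∧ 0 ≤ q.getD 0 0 ∧ q.getD 0 0 ≤ q.getD 1 0 ∧ q.getD 1 0 < (arr.length : Int)
instance (arr : List Int) (queries : List (List Int)) : Decidable (Pre_findMean arr queries) := by unfold Pre_findMean; infer_instance

def pvWitness_findMean : List Int × List (List Int) := ([1, 2, 3], [[0, 2], [1, 1]])

def Spec_findMean (arr : List Int) (queries : List (List Int)) (out : List Int) : Prop := out = findMean_alt arr queries
instance (arr : List Int) (queries : List (List Int)) (out : List Int) : Decidable (Spec_findMean arr queries out) := by unfold Spec_findMean; infer_instance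

-- ===== CLAIM (what is proved, stated in full; the proofs are below) =====
def Claim_equal_findMean : Prop := ∀ (arr : List Int) (queries : List (List Int)), Dom_findMean arr queries → Pre_findMean arr queries → Spec_findMean arr queries (findMean arr queries)

-- ===== LEMMAS AND PROOFS =====

-- Filling position i of a list with g i, for i in range(0, k), rewrites the first k entries.
lemma fill_aux (g : Int → Int) : ∀ (k : Nat) (acc : List Int), k ≤ acc.length →
    (PySem.List.pyRange 0 (k : Int) 1).foldl (fun ma i => PySem.List.pySetD ma i (g i)) acc
    = (List.range k).map (fun (j : Nat) => g (j : Int)) ++ acc.drop k := by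
  intro k
  induction k with
  | zero => intro acc _; simp [PySem.List.pyRange_one_eq_nil]
  | succ k ih =>
    intro acc h
    have hcast : ((k + 1 : Nat) : Int) = (k : Int) + 1 := by push_cast; ring
    rw [hcast, PySem.List.pyRange_one_succ_right (by exact_mod_cast Nat.zero_le k),
      List.foldl_append, ih acc (by omega)]
    simp only [List.foldl_cons, List.foldl_nil, PySem.List.pySetD_natCast]
    rw [List.set_append]
    have hml : ((List.range k).map (fun (j : Nat) => g (j : Int))).length = k := by simp
    rw [hml, if_neg (lt_irrefl k), Nat.sub_self]
    rw [List.drop_eq_getElem_cons (by omega : k < acc.length), List.set_cons_zero,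
      List.range_succ]
    simp

-- A's second loop: filling a zero list of length M at position i with g i, i in range(0, M), is a map.
lemma fill_fold (g : Int → Int) (M : Nat) :
    (PySem.List.pyRange 0 (M : Int) 1).foldl
      (fun ma i => PySem.List.pySetD ma i (g i)) (List.replicate M 0)
    = (PySem.List.pyRange 0 (M : Int) 1).map g := by
  rw [fill_aux g M (List.replicate M 0) (by simp), PySem.List.pyRange_zero_nat, List.map_map]
  simp [Function.comp]

-- A's first loop: after folding over range(0, k) the table holds the first k+1 prefix sums of arr.
lemma prefix_fold (arr : List Int) : ∀ (k : Nat), k ≤ arr.length →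
    (PySem.List.pyRange 0 (k : Int) 1).foldl
      (fun ps i => PySem.List.pySetD ps (i + 1) (PySem.List.pyGetD ps i 0 + PySem.List.pyGetD arr i 0))
      (List.replicate (arr.length + 1) 0)
    = (List.range (k + 1)).map (fun j => ((arr.take j).sum : Int)) ++ List.replicate (arr.length - k) 0 := by
  intro k
  induction k with
  | zero => intro _; simp [PySem.List.pyRange_one_eq_nil, List.replicate_succ]
  | succ k ih =>
    intro h
    have hcast : ((k + 1 : Nat) : Int) = (k : Int) + 1 := by push_cast; ring
    rw [hcast, PySem.List.pyRange_one_succ_right (by exact_mod_cast Nat.zero_le k),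
      List.foldl_append, ih (by omega)]
    simp only [List.foldl_cons, List.foldl_nil]
    have hget : PySem.List.pyGetD ((List.range (k + 1)).map (fun j => ((arr.take j).sum : Int)) ++ List.replicate (arr.length - k) 0) (k : Int) 0 = (arr.take k).sum := by
      rw [PySem.List.pyGetD_natCast, List.getD_append _ _ _ k (by simp),
        PySem.List.getD_map_range _ _ _ _ (by omega)]
    have harr : PySem.List.pyGetD arr (k : Int) 0 = arr[k]'(by omega) := by
      rw [PySem.List.pyGetD_ofNat arr k 0 (by omega)]
    rw [hget, harr]
    have hsum : (arr.take k).sum + arr[k]'(by omega) = (arr.take (k + 1)).sum := by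
      rw [List.take_add_one, List.sum_append, List.getElem?_eq_getElem (by omega : k < arr.length)]
      simp
    have hidx : ((k : Int) + 1) = ((k + 1 : Nat) : Int) := by push_cast; ring
    rw [hsum, hidx, PySem.List.pySetD_natCast, List.set_append]
    have hml : ((List.range (k + 1)).map (fun j => ((arr.take j).sum : Int))).length = k + 1 := by simp
    rw [hml, if_neg (lt_irrefl (k + 1)), Nat.sub_self]
    have hrep : arr.length - k = (arr.length - (k + 1)) + 1 := by omega
    rw [hrep, List.replicate_succ]
    simp [List.range_succ]

-- B's inner loop: the direct sum over range(l, r+1) equals the prefix-sum difference.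
lemma range_sum (arr : List Int) (l r : Int) (h0 : 0 ≤ l) (hlr : l ≤ r) (hr : r < (arr.length : Int)) :
    (PySem.List.pyRange l (r + 1) 1).foldl (fun t j => t + PySem.List.pyGetD arr j 0) 0
    = (arr.take (r + 1).toNat).sum - (arr.take l.toNat).sum := by
  have hcong : (PySem.List.pyRange l (r + 1) 1).foldl (fun t j => t + PySem.List.pyGetD arr j 0) 0
      = (PySem.List.pyRange l (r + 1) 1).foldl (fun t j => t + PySem.List.pyGetD (arr.take (r + 1).toNat) j 0) 0 := by
    apply PySem.List.foldl_congr_mem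
    intro acc j hj
    rw [PySem.List.mem_pyRange_one] at hj
    rw [PySem.List.pyGetD_of_nonneg _ _ (by omega), PySem.List.pyGetD_of_nonneg _ _ (by omega)]
    congr 1
    rw [List.getD_eq_getElem?_getD, List.getD_eq_getElem?_getD,
      List.getElem?_take_of_lt (by omega : j.toNat < (r + 1).toNat)]
  have hrange : PySem.List.pyRange l (r + 1) 1 = PySem.List.pyRange l (((arr.take (r + 1).toNat).length : Int)) 1 := by
    congr 1
    simp
    omega
  rw [hcong, hrange, PySem.List.foldl_pyRange_pyGetD' (arr.take (r + 1).toNat) 0 (fun t x => t + x) 0 h0]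
  rw [← List.sum_eq_foldl]
  have hsplit : (arr.take (r + 1).toNat).sum
      = ((arr.take (r + 1).toNat).take l.toNat).sum + ((arr.take (r + 1).toNat).drop l.toNat).sum := by
    rw [← List.sum_append, List.take_append_drop]
  rw [List.take_take, min_eq_left (by omega : l.toNat ≤ (r + 1).toNat)] at hsplit
  omega

-- Reading queries[i] for i in range(0, len(queries)) and applying F is mapping F over queries.
lemma map_index (qs : List (List Int)) (F : List Int → Int) :
    (PySem.List.pyRange 0 (qs.length : Int) 1).map (fun j => F (PySem.List.pyGetD qs j [])) = qs.map F := by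
  conv_rhs => rw [← PySem.List.map_pyGetD_pyRange_zero' qs ([] : List Int)]
  rw [List.map_map]
  rfl

-- ===== VERDICT (by name: the statement is the Claim_ definition above) =====
theorem findMean_spec : Claim_equal_findMean := by
  intro arr queries _ hpre
  unfold Spec_findMean
  simp only [findMean, findMean_alt, PySem.List.foldl_append_singleton_eq_map, List.nil_append,
    Int.toNat_natCast]
  rw [prefix_fold arr arr.length (le_refl _)]
  rw [Nat.sub_self, List.replicate_zero, List.append_nil]
  rw [fill_fold]
  refine Eq.trans (map_index queries (fun q =>
    PySem.Int.floordiv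
      (PySem.List.pyGetD ((List.range (arr.length + 1)).map (fun j => ((arr.take j).sum : Int)))
          (PySem.List.pyGetD q 1 0 + 1) 0 -
        PySem.List.pyGetD ((List.range (arr.length + 1)).map (fun j => ((arr.take j).sum : Int)))
          (PySem.List.pyGetD q 0 0) 0)
      (PySem.List.pyGetD q 1 0 - PySem.List.pyGetD q 0 0 + 1))) ?_
  apply List.map_congr_left
  intro q hq
  obtain ⟨hq2, hq0, hq01, hq1⟩ := hpre q hq
  obtain ⟨a, b, hab⟩ := List.length_eq_two.mp hq2
  subst hab
  simp only [List.getD_cons_zero, List.getD_cons_succ] at hq0 hq01 hq1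
  have hga : PySem.List.pyGetD ([a, b] : List Int) 0 0 = a := by simp [pysem]
  have hgb : PySem.List.pyGetD ([a, b] : List Int) 1 0 = b := by simp [pysem]
  rw [hga, hgb]
  have hPb : PySem.List.pyGetD ((List.range (arr.length + 1)).map (fun j => ((arr.take j).sum : Int))) (b + 1) 0 = (arr.take (b + 1).toNat).sum := by
    rw [PySem.List.pyGetD_of_nonneg _ _ (by omega),
      PySem.List.getD_map_range _ _ _ _ (by omega)]
  have hPa : PySem.List.pyGetD ((List.range (arr.length + 1)).map (fun j => ((arr.take j).sum : Int))) a 0 = (arr.take a.toNat).sum := by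
    rw [PySem.List.pyGetD_of_nonneg _ _ hq0,
      PySem.List.getD_map_range _ _ _ _ (by omega)]
  rw [hPb, hPa, range_sum arr a b hq0 hq01 hq1]
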